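-- pv_equiv track=rewrite | github.com/yfzzzyyls/Design_and_Verification_Projects | prepare_calibre_lvs_source.py | parse_shell_subckts_from_spi
-- ===== SOURCE A (Python) =====
-- from typing import Dict, List, Optional, Set, Tuple
--
-- def parse_shell_subckts_from_spi(text: str, drop_pins: Set[str]) -> List[Tuple[str, List[str]]]:
--     subckts: List[Tuple[str, List[str]]] = []
--     lines = text.splitlines()
--     i = 0
--     while i < len(lines):
--         line = lines[i].strip()
--         if not line.lower().startswith(".subckt "):
--             i += 1
--             continue
--         header = line
--         i += 1
--         while i < len(lines) and lines[i].lstrip().startswith("+"):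
--             header += " " + lines[i].lstrip()[1:].strip()
--             i += 1
--         tokens = header.split()
--         if len(tokens) >= 2:
--             name = tokens[1]
--             pins = [tok for tok in tokens[2:] if tok not in drop_pins]
--             subckts.append((name, pins))
--     return subckts
-- ===== SOURCE B (Python) =====
-- def parse_shell_subckts_from_spi(text, drop_pins):
--     # Pass 1: fold physical lines into blocks: (stripped first line, continuation contents).
--     blocks = []
--     for raw in text.splitlines():
--         ls = raw.lstrip()
--         if ls.startswith("+") and blocks:
--             blocks[-1][1].append(ls[1:].strip())
--         else:
--             blocks.append((raw.strip(), []))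
--     # Pass 2: keep the .subckt blocks, joining each block into one header.
--     out = []
--     for head, conts in blocks:
--         if head.lower().startswith(".subckt "):
--             tokens = " ".join([head] + conts).split()
--             if len(tokens) >= 2:
--                 out.append((tokens[1], [t for t in tokens[2:] if t not in drop_pins]))
--     return out
-- ===== Notes on version B (the rewrite author's own statement) =====
-- stated objective: alternative
-- what changed: A's single index-driven while loop with a nested continuation-consuming inner while is replaced by two independent passes: a fold grouping the physical lines into blocks (stripped first line plus list of continuation contents), then a scan over the blocks that joins and parses the '.subckt ' headers.
import Mathlib
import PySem

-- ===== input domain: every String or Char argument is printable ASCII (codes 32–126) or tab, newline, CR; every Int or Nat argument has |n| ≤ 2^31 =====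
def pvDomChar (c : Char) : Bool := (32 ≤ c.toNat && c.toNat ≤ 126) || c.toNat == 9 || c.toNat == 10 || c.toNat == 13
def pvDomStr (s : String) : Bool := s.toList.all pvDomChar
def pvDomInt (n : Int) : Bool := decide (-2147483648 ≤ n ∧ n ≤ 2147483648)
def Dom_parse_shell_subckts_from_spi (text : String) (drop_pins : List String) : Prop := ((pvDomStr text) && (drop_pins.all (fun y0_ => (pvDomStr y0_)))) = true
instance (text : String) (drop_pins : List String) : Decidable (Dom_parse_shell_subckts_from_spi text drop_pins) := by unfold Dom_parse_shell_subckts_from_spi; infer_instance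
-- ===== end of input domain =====

-- B replaces A's index-driven while loop with its nested continuation-consuming inner while by two
-- independent passes: a fold grouping the physical lines into blocks (first line + continuation
-- contents), then a scan of the blocks for '.subckt ' headers; same cost, different decomposition.

-- ===== PORT A =====
-- inner while: consume '+' continuation lines into the header
def pvA_cont : List String → String → String × List String
  | [], header => (header, [])
  | l :: rest, header =>
    if PySem.Str.startswith (PySem.Str.lstrip l) "+" then
      pvA_cont rest (header ++ " " ++ PySem.Str.strip (PySem.Str.slice (PySem.Str.lstrip l) (some 1) none))
    else (header, l :: rest)

-- (termination fact for the outer loop; cited by pvA_loop's decreasing_by)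
theorem pvA_cont_length : ∀ (ls : List String) (h : String), (pvA_cont ls h).2.length ≤ ls.length := by
  intro ls
  induction ls with
  | nil => intro h; simp [pvA_cont]
  | cons l rest ih =>
    intro h
    simp only [pvA_cont]
    split
    · exact le_trans (ih _) (by simp)
    · simp

-- outer while over the remaining lines (the i-advance becomes recursion on the suffix)
def pvA_loop : List String → List String → List (String × List String)
  | [], _ => []
  | l :: rest, drop_pins =>
    let line := PySem.Str.strip l
    if PySem.Str.startswith (PySem.Str.lower line) ".subckt " then
      let hr := pvA_cont rest line
      let tokens := PySem.Str.split₀ hr.1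
      if 2 ≤ tokens.length then
        (tokens.getD 1 "", (tokens.drop 2).filter (fun tok => !(drop_pins.contains tok))) :: pvA_loop hr.2 drop_pins
      else pvA_loop hr.2 drop_pins
    else pvA_loop rest drop_pins
termination_by ls _ => ls.length
decreasing_by
  · exact Nat.lt_succ_of_le (pvA_cont_length _ _)
  · exact Nat.lt_succ_of_le (pvA_cont_length _ _)
  · exact Nat.lt_succ_of_le (le_refl _)

def parse_shell_subckts_from_spi (text : String) (drop_pins : List String) : List (String × List String) :=
  pvA_loop (PySem.Str.splitlines text) drop_pins

-- ===== PORT B =====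
-- pass 1 step: accumulator holds the blocks (head line, continuation contents) in reverse
-- (append-to-last = modify head of the reversed list)
def pvB_join (acc : List (String × List String)) (raw : String) : List (String × List String) :=
  if PySem.Str.startswith (PySem.Str.lstrip raw) "+" then
    match acc with
    | [] => [(PySem.Str.strip raw, [])]
    | (h, cs) :: done =>
      (h, cs ++ [PySem.Str.strip (PySem.Str.slice (PySem.Str.lstrip raw) (some 1) none)]) :: done
  else (PySem.Str.strip raw, []) :: acc

-- pass 2 step: append the parsed header (if any) of one block
def pvB_emit (drop_pins : List String) (out : List (String × List String)) (blk : String × List String) : List (String × List String) :=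
  if PySem.Str.startswith (PySem.Str.lower blk.1) ".subckt " then
    let tokens := PySem.Str.split₀ (PySem.Str.join " " (blk.1 :: blk.2))
    if 2 ≤ tokens.length then
      out ++ [(tokens.getD 1 "", (tokens.drop 2).filter (fun tok => !(drop_pins.contains tok)))]
    else out
  else out

def parse_shell_subckts_from_spi_alt (text : String) (drop_pins : List String) : List (String × List String) :=
  (((PySem.Str.splitlines text).foldl pvB_join []).reverse).foldl (pvB_emit drop_pins) []

-- ===== PRECONDITION & SPEC =====
def Spec_parse_shell_subckts_from_spi (text : String) (drop_pins : List String) (out : List (String × List String)) : Prop := out = parse_shell_subckts_from_spi_alt text drop_pins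
instance (text : String) (drop_pins : List String) (out : List (String × List String)) : Decidable (Spec_parse_shell_subckts_from_spi text drop_pins out) := by unfold Spec_parse_shell_subckts_from_spi; infer_instance

-- ===== CLAIM (what is proved, stated in full; the proofs are below) =====
def Claim_equal_parse_shell_subckts_from_spi : Prop := ∀ (text : String) (drop_pins : List String), Dom_parse_shell_subckts_from_spi text drop_pins → Spec_parse_shell_subckts_from_spi text drop_pins (parse_shell_subckts_from_spi text drop_pins)

-- ===== LEMMAS AND PROOFS =====

-- shared vocabulary for the proofs
def pvHdr (s : String) : Bool := PySem.Str.startswith (PySem.Str.lower s) ".subckt "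
def pvPlus (l : String) : Bool := PySem.Str.startswith (PySem.Str.lstrip l) "+"
def pvCont (l : String) : String := PySem.Str.strip (PySem.Str.slice (PySem.Str.lstrip l) (some 1) none)
def pvEntryB (dp : List String) (blk : String × List String) : List (String × List String) :=
  if pvHdr blk.1 then
    let toks := PySem.Str.split₀ (PySem.Str.join " " (blk.1 :: blk.2))
    if 2 ≤ toks.length then [(toks.getD 1 "", (toks.drop 2).filter (fun tok => !(dp.contains tok)))] else []
  else []
-- the continuation contents consumed at the head of the line list, and the remainder
def pvTake : List String → List String × List String
  | [] => ([], [])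
  | l :: rest => if pvPlus l then (pvCont l :: (pvTake rest).1, (pvTake rest).2) else ([], l :: rest)
def pvGroup1 (h : String) (cs : List String) : List String → List (String × List String)
  | [] => [(h, cs)]
  | l :: rest =>
    if pvPlus l then pvGroup1 h (cs ++ [pvCont l]) rest
    else (h, cs) :: pvGroup1 (PySem.Str.strip l) [] rest
def pvGroupB : List String → List (String × List String)
  | [] => []
  | l :: rest => pvGroup1 (PySem.Str.strip l) [] rest

-- ---- unfolding equations ----
theorem pvTake_cons_pos (l : String) (ls : List String) (hp : pvPlus l = true) :
    pvTake (l :: ls) = (pvCont l :: (pvTake ls).1, (pvTake ls).2) := by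
  conv_lhs => unfold pvTake
  rw [if_pos hp]

theorem pvTake_cons_neg (l : String) (ls : List String) (hp : pvPlus l = false) :
    pvTake (l :: ls) = ([], l :: ls) := by
  conv_lhs => unfold pvTake
  rw [if_neg (by simp [hp])]

theorem pvGroup1_cons_pos (h : String) (cs : List String) (l : String) (ls : List String) (hp : pvPlus l = true) :
    pvGroup1 h cs (l :: ls) = pvGroup1 h (cs ++ [pvCont l]) ls := by
  conv_lhs => unfold pvGroup1
  rw [if_pos hp]

theorem pvGroup1_cons_neg (h : String) (cs : List String) (l : String) (ls : List String) (hp : pvPlus l = false) :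
    pvGroup1 h cs (l :: ls) = (h, cs) :: pvGroup1 (PySem.Str.strip l) [] ls := by
  conv_lhs => unfold pvGroup1
  rw [if_neg (by simp [hp])]

theorem pvA_cont_cons_pos (h l : String) (ls : List String) (hp : pvPlus l = true) :
    pvA_cont (l :: ls) h = pvA_cont ls (h ++ " " ++ pvCont l) := by
  have hp2 : PySem.Str.startswith (PySem.Str.lstrip l) "+" = true := hp
  conv_lhs => unfold pvA_cont
  rw [if_pos hp2]
  rfl

theorem pvA_cont_cons_neg (h l : String) (ls : List String) (hp : pvPlus l = false) :
    pvA_cont (l :: ls) h = (h, l :: ls) := by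
  have hp2 : PySem.Str.startswith (PySem.Str.lstrip l) "+" = false := hp
  conv_lhs => unfold pvA_cont
  rw [if_neg (fun hx => absurd (hp2.symm.trans hx) Bool.false_ne_true)]

theorem pvA_loop_nil (dp : List String) : pvA_loop [] dp = [] := by
  rw [pvA_loop.eq_def]

theorem pvA_loop_cons_hdr (l : String) (ls dp : List String) (hh : pvHdr (PySem.Str.strip l) = true) :
    pvA_loop (l :: ls) dp =
      (if 2 ≤ (PySem.Str.split₀ (pvA_cont ls (PySem.Str.strip l)).1).length then
        ((PySem.Str.split₀ (pvA_cont ls (PySem.Str.strip l)).1).getD 1 "",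
          ((PySem.Str.split₀ (pvA_cont ls (PySem.Str.strip l)).1).drop 2).filter
            (fun tok => !(dp.contains tok))) :: pvA_loop (pvA_cont ls (PySem.Str.strip l)).2 dp
      else pvA_loop (pvA_cont ls (PySem.Str.strip l)).2 dp) := by
  rw [pvA_loop.eq_def]
  exact if_pos hh

theorem pvA_loop_cons_nonhdr (l : String) (ls dp : List String) (hh : pvHdr (PySem.Str.strip l) = false) :
    pvA_loop (l :: ls) dp = pvA_loop ls dp := by
  rw [pvA_loop.eq_def]
  exact if_neg (by simp [pvHdr] at hh ⊢; simp [hh])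

-- ---- B normalisation ----
theorem pvB_join_fold : ∀ (ls : List String) (h : String) (cs : List String) (t : List (String × List String)),
    (ls.foldl pvB_join ((h, cs) :: t)).reverse = t.reverse ++ pvGroup1 h cs ls := by
  intro ls
  induction ls with
  | nil => intro h cs t; simp [pvGroup1]
  | cons l ls ih =>
    intro h cs t
    simp only [List.foldl_cons]
    by_cases hp : pvPlus l = true
    · have hp2 : PySem.Str.startswith (PySem.Str.lstrip l) "+" = true := hp
      have hj : pvB_join ((h, cs) :: t) l = (h, cs ++ [pvCont l]) :: t := by
        unfold pvB_join
        rw [if_pos hp2]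
        rfl
      rw [hj, ih, pvGroup1_cons_pos _ _ _ _ hp]
    · have hp' : pvPlus l = false := by simpa using hp
      have hp2 : PySem.Str.startswith (PySem.Str.lstrip l) "+" = false := hp'
      have hj : pvB_join ((h, cs) :: t) l = (PySem.Str.strip l, []) :: (h, cs) :: t := by
        unfold pvB_join
        rw [if_neg (fun hx => absurd (hp2.symm.trans hx) Bool.false_ne_true)]
      rw [hj, ih, pvGroup1_cons_neg _ _ _ _ hp']
      simp

theorem pvB_group : ∀ (ls : List String), (ls.foldl pvB_join []).reverse = pvGroupB ls := by
  intro ls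
  cases ls with
  | nil => simp [pvGroupB]
  | cons l ls =>
    have hj : pvB_join [] l = [(PySem.Str.strip l, [])] := by
      unfold pvB_join; split <;> rfl
    simp only [List.foldl_cons, hj]
    rw [pvB_join_fold ls (PySem.Str.strip l) [] []]
    simp [pvGroupB]

theorem pvB_emit_fold : ∀ (dp : List String) (ls : List (String × List String)) (out : List (String × List String)),
    ls.foldl (pvB_emit dp) out = out ++ ls.flatMap (pvEntryB dp) := by
  intro dp ls
  induction ls with
  | nil => intro out; simp
  | cons l ls ih =>
    intro out
    have he : pvB_emit dp out l = out ++ pvEntryB dp l := by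
      unfold pvB_emit pvEntryB pvHdr
      split <;> simp <;> split <;> simp
    simp only [List.foldl_cons, he, ih, List.flatMap_cons, List.append_assoc]

theorem alt_eq (text : String) (dp : List String) :
    parse_shell_subckts_from_spi_alt text dp = (pvGroupB (PySem.Str.splitlines text)).flatMap (pvEntryB dp) := by
  unfold parse_shell_subckts_from_spi_alt
  rw [pvB_group, pvB_emit_fold]
  simp

-- ---- joining lemmas ----
theorem pv_join_single (s : String) : PySem.Str.join " " [s] = s := by
  unfold PySem.Str.join PySem.Chars.join
  simp [List.intercalate]

theorem pv_join_cons (s c : String) (xs : List String) :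
    PySem.Str.join " " (s :: c :: xs) = PySem.Str.join " " ((s ++ " " ++ c) :: xs) := by
  apply String.toList_inj.mp
  simp only [PySem.Str.toList_join, PySem.Chars.join, List.map_cons, String.toList_append]
  rw [show (" " : String).toList = [' '] from by decide]
  cases xs with
  | nil => simp [List.intercalate]
  | cons x xs => simp [List.intercalate, List.intersperse]

-- ---- A's inner loop produces exactly the joined block ----
theorem pvA_cont_take : ∀ (ls : List String) (s : String),
    pvA_cont ls s = (PySem.Str.join " " (s :: (pvTake ls).1), (pvTake ls).2) := by
  intro ls
  induction ls with
  | nil =>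
    intro s
    simp [pvA_cont, pvTake, pv_join_single]
  | cons l rest ih =>
    intro s
    by_cases hp : pvPlus l = true
    · rw [pvA_cont_cons_pos _ _ _ hp, ih, pvTake_cons_pos _ _ hp, ← pv_join_cons]
    · have hp' : pvPlus l = false := by simpa using hp
      rw [pvA_cont_cons_neg _ _ _ hp', pvTake_cons_neg _ _ hp', pv_join_single]

theorem pvGroup1_take : ∀ (ls : List String) (h : String) (cs : List String),
    pvGroup1 h cs ls = (h, cs ++ (pvTake ls).1) :: pvGroupB (pvTake ls).2 := by
  intro ls
  induction ls with
  | nil => intro h cs; simp [pvGroup1, pvTake, pvGroupB]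
  | cons l rest ih =>
    intro h cs
    by_cases hp : pvPlus l = true
    · rw [pvGroup1_cons_pos _ _ _ _ hp, ih, pvTake_cons_pos _ _ hp]
      simp
    · have hp' : pvPlus l = false := by simpa using hp
      rw [pvGroup1_cons_neg _ _ _ _ hp', pvTake_cons_neg _ _ hp']
      simp [pvGroupB]

theorem pvEntryB_hdr (dp : List String) (h : String) (cs : List String) (hh : pvHdr h = true) :
    pvEntryB dp (h, cs) =
      (if 2 ≤ (PySem.Str.split₀ (PySem.Str.join " " (h :: cs))).length then
        [((PySem.Str.split₀ (PySem.Str.join " " (h :: cs))).getD 1 "",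
          ((PySem.Str.split₀ (PySem.Str.join " " (h :: cs))).drop 2).filter
            (fun tok => !(dp.contains tok)))]
      else []) := by
  unfold pvEntryB
  exact if_pos hh

theorem pvEntryB_nonhdr (dp : List String) (h : String) (cs : List String) (hh : pvHdr h = false) :
    pvEntryB dp (h, cs) = [] := by
  unfold pvEntryB
  exact if_neg (fun hx => absurd (hh.symm.trans hx) Bool.false_ne_true)

-- a '+' continuation line is never itself a '.subckt ' header, so A skips the consumed lines
theorem pv_plus_not_hdr (l : String) (hp : pvPlus l = true) : pvHdr (PySem.Str.strip l) = false := by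
  unfold pvPlus PySem.Str.startswith at hp
  rw [PySem.Chars.startswith_iff] at hp
  simp only [PySem.Str.toList_lstrip] at hp
  rw [show ("+" : String).toList = ['+'] from by decide] at hp
  obtain ⟨u, hu⟩ := hp
  unfold pvHdr PySem.Str.startswith
  simp only [PySem.Str.toList_lower, PySem.Str.toList_strip]
  unfold PySem.Chars.strip PySem.Chars.rstrip
  rw [← hu, List.reverse_append, List.dropWhile_append]
  have hplus : List.dropWhile PySem.Chars.isspace (['+'] : List Char).reverse = ['+'] := by decide
  rw [hplus]
  split
  · decide
  · simp only [List.reverse_append, List.reverse_cons, List.reverse_nil, List.nil_append,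
      List.singleton_append]
    apply Bool.eq_false_iff.mpr
    intro hx
    have hpre := (PySem.Chars.startswith_iff _ _).mp hx
    rw [show (".subckt " : String).toList = '.' :: "subckt ".toList from by decide] at hpre
    have hcons := (List.cons_prefix_cons.mp (by
      simpa only [PySem.Chars.lower, List.map_cons] using hpre)).1
    exact absurd hcons (by decide)

theorem pvA_skip : ∀ (ls : List String) (h : String) (dp : List String),
    pvA_loop (pvA_cont ls h).2 dp = pvA_loop ls dp := by
  intro ls
  induction ls with
  | nil => intro h dp; simp [pvA_cont]
  | cons l rest ih =>
    intro h dp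
    by_cases hp : pvPlus l = true
    · rw [pvA_cont_cons_pos _ _ _ hp, ih,
        pvA_loop_cons_nonhdr _ _ _ (pv_plus_not_hdr _ hp)]
    · rw [pvA_cont_cons_neg _ _ _ (by simpa using hp)]

-- ---- main induction ----
theorem pv_main : ∀ (n : Nat) (ls : List String) (dp : List String), ls.length ≤ n →
    pvA_loop ls dp = (pvGroupB ls).flatMap (pvEntryB dp) := by
  intro n
  induction n with
  | zero =>
    intro ls dp hle
    have h0 : ls = [] := List.eq_nil_of_length_eq_zero (Nat.le_zero.mp hle)
    subst h0
    simp [pvA_loop_nil, pvGroupB]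
  | succ n ih =>
    intro ls dp hle
    cases ls with
    | nil => simp [pvA_loop_nil, pvGroupB]
    | cons l rest =>
      have hgl : pvGroupB (l :: rest) = pvGroup1 (PySem.Str.strip l) [] rest := rfl
      have hlen : (pvA_cont rest (PySem.Str.strip l)).2.length ≤ n :=
        le_trans (pvA_cont_length _ _) (Nat.le_of_succ_le_succ hle)
      have hct := pvA_cont_take rest (PySem.Str.strip l)
      have h1 : (pvA_cont rest (PySem.Str.strip l)).1
          = PySem.Str.join " " (PySem.Str.strip l :: (pvTake rest).1) := by rw [hct]
      have h2 : (pvA_cont rest (PySem.Str.strip l)).2 = (pvTake rest).2 := by rw [hct]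
      have hrec := ih (pvA_cont rest (PySem.Str.strip l)).2 dp hlen
      rw [hgl, pvGroup1_take, List.flatMap_cons, List.nil_append]
      rw [h2] at hrec
      by_cases hH : pvHdr (PySem.Str.strip l) = true
      · rw [pvA_loop_cons_hdr _ _ _ hH, h1, h2, hrec, pvEntryB_hdr dp _ _ hH]
        by_cases ht : 2 ≤ (PySem.Str.split₀ (PySem.Str.join " " (PySem.Str.strip l :: (pvTake rest).1))).length
        · rw [if_pos ht, if_pos ht]
          rfl
        · rw [if_neg ht, if_neg ht]
          rfl
      · have hHf : pvHdr (PySem.Str.strip l) = false := by simpa using hH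
        rw [pvA_loop_cons_nonhdr _ _ _ hHf, pvEntryB_nonhdr dp _ _ hHf,
          ← pvA_skip rest (PySem.Str.strip l) dp, h2, hrec, List.nil_append]

-- ===== VERDICT (by name: the statement is the Claim_ definition above) =====
theorem parse_shell_subckts_from_spi_spec : Claim_equal_parse_shell_subckts_from_spi := by
  intro text dp _
  have h1 := pv_main (PySem.Str.splitlines text).length (PySem.Str.splitlines text) dp le_rfl
  rw [Spec_parse_shell_subckts_from_spi, parse_shell_subckts_from_spi, alt_eq, h1]
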